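-- pv_equiv track=rewrite | github.com/priitohlo/iti0102-2022 | EX/ex09_recursion/meta.py | apply_dragon_rules
-- ===== SOURCE A (Python) =====
-- def apply_dragon_rules(string):
--     """
--     Write a recursive function that replaces characters in string.
--
--     Like so:
--         "a" -> "aRbFR"
--         "b" -> "LFaLb"
--     apply_dragon_rules("a") -> "aRbFR"
--     apply_dragon_rules("aa") -> "aRbFRaRbFR"
--     apply_dragon_rules("FRaFRb") -> "FRaRbFRFRLFaLb"
--
--     :param string: sentence with "a" and "b" characters that need to be replaced
--     :return: new sentence with "a" and "b" characters replaced
--     """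
--     if not string:
--         return ""
--     elif string[0] == 'a':
--         return "aRbFR" + apply_dragon_rules(string[1:])
--     elif string[0] == 'b':
--         return "LFaLb" + apply_dragon_rules(string[1:])
--     else:
--         return string[0] + apply_dragon_rules(string[1:])
-- ===== SOURCE B (Python) =====
-- def apply_dragon_rules(string):
--     out = ""
--     for ch in reversed(string):
--         if ch == 'a':
--             out = "aRbFR" + out
--         elif ch == 'b':
--             out = "LFaLb" + out
--         else:
--             out = ch + out
--     return out
-- ===== Notes on version B (the rewrite author's own statement) =====
-- stated objective: alternative
-- what changed: A's head recursion with slicing is replaced by a backwards traversal (reversed(string)) that builds the result back-to-front by prepending each expansion to the accumulator.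
import Mathlib
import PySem

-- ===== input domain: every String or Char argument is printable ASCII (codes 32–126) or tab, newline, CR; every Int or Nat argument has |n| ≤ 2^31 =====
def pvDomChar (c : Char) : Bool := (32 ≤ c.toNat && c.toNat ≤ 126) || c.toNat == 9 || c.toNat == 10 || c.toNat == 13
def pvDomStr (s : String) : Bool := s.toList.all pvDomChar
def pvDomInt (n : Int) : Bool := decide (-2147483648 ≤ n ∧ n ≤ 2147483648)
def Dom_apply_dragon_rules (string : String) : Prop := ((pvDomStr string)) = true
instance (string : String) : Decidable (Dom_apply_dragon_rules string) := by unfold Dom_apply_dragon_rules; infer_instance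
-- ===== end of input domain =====

-- B traverses the string BACKWARDS and builds the result back-to-front by prepending each
-- character's expansion to the accumulator; objective: alternative decomposition, same exact result.

-- ===== PORT A =====
-- A's recursion on string[0] / string[1:], transcribed on the char list.
def pvGoA : List Char → List Char
  | [] => []
  | c :: rest =>
    if c = 'a' then "aRbFR".toList ++ pvGoA rest
    else if c = 'b' then "LFaLb".toList ++ pvGoA rest
    else c :: pvGoA rest

def apply_dragon_rules (string : String) : String := String.mk (pvGoA string.toList)

-- ===== PORT B =====
-- Source B's per-character expansion (the if/elif/else branch body).
def pvExp (c : Char) : List Char :=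
  if c = 'a' then "aRbFR".toList else if c = 'b' then "LFaLb".toList else [c]

-- Source B's loop over reversed(string): prepend the expansion to the running output.
def pvGoB (out : List Char) : List Char → List Char
  | [] => out
  | c :: rest => pvGoB (pvExp c ++ out) rest

def apply_dragon_rules_alt (string : String) : String :=
  String.mk (pvGoB [] string.toList.reverse)

-- ===== PRECONDITION & SPEC =====
def Spec_apply_dragon_rules (string : String) (out : String) : Prop := out = apply_dragon_rules_alt string
instance (string : String) (out : String) : Decidable (Spec_apply_dragon_rules string out) := by unfold Spec_apply_dragon_rules; infer_instance

-- ===== CLAIM =====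
def Claim_equal_apply_dragon_rules : Prop := ∀ (string : String), Dom_apply_dragon_rules string → Spec_apply_dragon_rules string (apply_dragon_rules string)

-- ===== LEMMAS AND PROOFS =====
theorem pvGoA_singleton (c : Char) : pvGoA [c] = pvExp c := by
  by_cases ha : c = 'a' <;> by_cases hb : c = 'b' <;> simp [pvGoA, pvExp, ha, hb]

theorem pvGoA_append (xs ys : List Char) : pvGoA (xs ++ ys) = pvGoA xs ++ pvGoA ys := by
  induction xs with
  | nil => simp [pvGoA]
  | cons c rest ih =>
    by_cases ha : c = 'a' <;> by_cases hb : c = 'b' <;> simp [pvGoA, ha, hb, ih]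

theorem pvGoB_eq (rev : List Char) : ∀ out : List Char,
    pvGoB out rev = pvGoA rev.reverse ++ out := by
  induction rev with
  | nil => intro out; simp [pvGoB, pvGoA]
  | cons c rest ih =>
    intro out
    simp only [pvGoB, ih, List.reverse_cons, pvGoA_append, pvGoA_singleton, List.append_assoc]

-- ===== VERDICT =====
theorem apply_dragon_rules_spec : Claim_equal_apply_dragon_rules := by
  intro s _
  unfold Spec_apply_dragon_rules apply_dragon_rules apply_dragon_rules_alt
  rw [pvGoB_eq, List.reverse_reverse, List.append_nil]
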